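-- pv_equiv track=rewrite | github.com/EduardoMSA/Proyectos_ISC_ITESM | Programas Python/Sereja(1).py | sns
-- ===== SOURCE A (Python) =====
-- def sns(a,b):
--     result= []
--     for i in b:
--         tmp = a[i-1:]
--         tmp2 = []
--         for x in tmp:
--             if x not in tmp2:
--                 tmp2.append(x)
--         result.append(len(tmp2))
--     return result
-- ===== SOURCE B (Python) =====
-- def sns(a, b):
--     # One reverse pass computes distinct-counts of every suffix; each query is then an O(1) lookup.
--     n = len(a)
--     suf = [0] * (n + 1)
--     seen = set()
--     for j in range(n - 1, -1, -1):
--         seen.add(a[j])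
--         suf[j] = len(seen)
--     out = []
--     for i in b:
--         s = i - 1
--         if s < 0:
--             s = max(n + s, 0)   # Python slice-start normalisation
--         elif s > n:
--             s = n
--         out.append(suf[s])
--     return out
-- ===== Notes on version B (the rewrite author's own statement) =====
-- stated objective: faster
-- what changed: Replaces the per-query slice plus quadratic manual dedup with one reverse pass building a suffix distinct-count array and O(1) lookups per query.
import Mathlib
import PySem

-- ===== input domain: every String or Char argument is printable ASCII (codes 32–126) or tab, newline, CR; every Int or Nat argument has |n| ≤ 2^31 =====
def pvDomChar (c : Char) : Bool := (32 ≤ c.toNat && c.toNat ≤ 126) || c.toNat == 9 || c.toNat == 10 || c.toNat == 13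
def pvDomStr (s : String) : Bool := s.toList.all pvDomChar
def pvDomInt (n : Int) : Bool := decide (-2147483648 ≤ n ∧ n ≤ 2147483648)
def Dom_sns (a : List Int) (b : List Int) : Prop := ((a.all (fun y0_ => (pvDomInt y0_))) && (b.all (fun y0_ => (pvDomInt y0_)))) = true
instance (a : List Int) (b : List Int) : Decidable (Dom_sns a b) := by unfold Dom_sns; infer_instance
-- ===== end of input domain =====

-- B replaces A's per-query slice + quadratic manual dedup by one reverse pass building a
-- suffix distinct-count array with a set, then O(1) lookups per query (objective: faster).

-- ===== PORT A =====
def sns (a : List Int) (b : List Int) : List Int :=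
  b.foldl (fun result i =>
    let tmp := PySem.List.slice a (some (i - 1)) none
    let tmp2 := tmp.foldl (fun tmp2 x => if tmp2.contains x then tmp2 else tmp2 ++ [x]) []
    result ++ [(tmp2.length : Int)]) []

-- ===== PORT B =====
-- reverse pass of Source B: processing the list right-to-left adding each element to 'seen'
-- and recording len(seen) in front of the suffix-count list (suf[n] = 0 is the seed).
def snsSuf (a : List Int) : PySem.Set Int × List Int :=
  match a with
  | [] => ([], [(0 : Int)])
  | x :: xs =>
    let p := snsSuf xs
    let seen := PySem.Set.add p.1 x
    (seen, (seen.length : Int) :: p.2)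

def sns_alt (a : List Int) (b : List Int) : List Int :=
  let n := a.length
  let suf := (snsSuf a).2
  b.map (fun i =>
    let s := i - 1
    let s' : Nat := if s < 0 then ((n : Int) + s).toNat else min s.toNat n
    suf.getD s' 0)

-- ===== PRECONDITION & SPEC =====
def Spec_sns (a : List Int) (b : List Int) (out : List Int) : Prop := out = sns_alt a b
instance (a : List Int) (b : List Int) (out : List Int) : Decidable (Spec_sns a b out) := by unfold Spec_sns; infer_instance

-- ===== CLAIM (what is proved, stated in full; the proofs are below) =====
def Claim_equal_sns : Prop := ∀ (a : List Int) (b : List Int), Dom_sns a b → Spec_sns a b (sns a b)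

-- ===== LEMMAS AND PROOFS =====

-- A's inner manual dedup loop is exactly set-of-list (first occurrences, in order).
theorem snsInner_eq_ofList (tmp : List Int) :
    tmp.foldl (fun tmp2 x => if tmp2.contains x then tmp2 else tmp2 ++ [x]) [] =
      PySem.Set.ofList tmp := by
  rw [PySem.Set.ofList_eq_foldl]
  apply PySem.List.foldl_congr_mem  -- same fold, pointwise-equal step functions
  intro s x _
  simp [PySem.Set.add, PySem.Set.contains]

-- a nodup list with the same members as xs has length xs.toFinset.card
theorem length_eq_card_of_nodup_mem (l xs : List Int) (hnd : l.Nodup)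
    (hmem : ∀ y, y ∈ l ↔ y ∈ xs) : l.length = xs.toFinset.card := by
  have : l.toFinset = xs.toFinset := by
    ext y; simp [List.mem_toFinset, hmem]
  rw [← this, List.toFinset_card_of_nodup hnd]

-- invariant of the reverse pass
theorem snsSuf_invariant (a : List Int) :
    (snsSuf a).1.Nodup ∧ (∀ y, y ∈ (snsSuf a).1 ↔ y ∈ a) ∧
      ∀ k : Nat, k ≤ a.length →
        (snsSuf a).2.getD k 0 = (((a.drop k).toFinset.card : Nat) : Int) := by
  induction a with
  | nil =>
    refine ⟨List.nodup_nil, by simp [snsSuf], ?_⟩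
    intro k hk
    have hk0 : k = 0 := Nat.le_zero.mp hk
    subst hk0
    simp [snsSuf]
  | cons x xs ih =>
    obtain ⟨hnd, hmem, hsuf⟩ := ih
    have hnd' : (PySem.Set.add (snsSuf xs).1 x).Nodup := PySem.Set.nodup_add _ _ hnd
    have hmem' : ∀ y, y ∈ PySem.Set.add (snsSuf xs).1 x ↔ y ∈ x :: xs := by
      intro y
      rw [PySem.Set.mem_add]
      simp [hmem y, or_comm]
    refine ⟨hnd', hmem', ?_⟩
    intro k hk
    match k with
    | 0 =>
      have := length_eq_card_of_nodup_mem _ (x :: xs) hnd' hmem'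
      simpa [snsSuf] using congrArg (fun n : Nat => (n : Int)) this
    | Nat.succ k =>
      have hk' : k ≤ xs.length := by simpa using hk
      simpa [snsSuf] using hsuf k hk'

-- the set built by A's dedup has length = card of distinct elements
theorem ofList_length (xs : List Int) :
    ((PySem.Set.ofList xs).length : Int) = ((xs.toFinset.card : Nat) : Int) := by
  have := length_eq_card_of_nodup_mem (PySem.Set.ofList xs) xs
    (PySem.Set.nodup_ofList xs) (fun y => PySem.Set.mem_ofList xs y)
  exact_mod_cast congrArg (fun n : Nat => (n : Int)) this

-- Python's slice-start clamping equals B's arithmetic normalisation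
theorem clampIdx_eq (n : Nat) (s : Int) :
    PySem.List.clampIdx n s = if s < 0 then ((n : Int) + s).toNat else min s.toNat n := by
  simp only [PySem.List.clampIdx]
  split_ifs with h1 h2 <;> omega

theorem clampIdx_le' (n : Nat) (s : Int) : PySem.List.clampIdx n s ≤ n := by
  simp only [PySem.List.clampIdx]
  split_ifs <;> omega

-- the per-query values agree
theorem pointwise (a : List Int) (i : Int) :
    ((PySem.List.slice a (some (i - 1)) none).foldl
        (fun tmp2 x => if tmp2.contains x then tmp2 else tmp2 ++ [x]) []).length =
      (snsSuf a).2.getD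
        (if i - 1 < 0 then ((a.length : Int) + (i - 1)).toNat else min (i - 1).toNat a.length) 0 := by
  rw [snsInner_eq_ofList, PySem.List.slice_some_none, ← clampIdx_eq]
  have h := (snsSuf_invariant a).2.2 (PySem.List.clampIdx a.length (i - 1))
    (clampIdx_le' a.length (i - 1))
  rw [h]
  exact_mod_cast ofList_length (a.drop (PySem.List.clampIdx a.length (i - 1)))

-- A's foldl-with-append over the queries is a map
theorem sns_foldl_map (a : List Int) (b : List Int) (acc : List Int) :
    b.foldl (fun result i =>
      let tmp := PySem.List.slice a (some (i - 1)) none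
      let tmp2 := tmp.foldl (fun tmp2 x => if tmp2.contains x then tmp2 else tmp2 ++ [x]) []
      result ++ [(tmp2.length : Int)]) acc =
    acc ++ b.map (fun i =>
      (((PySem.List.slice a (some (i - 1)) none).foldl
          (fun tmp2 x => if tmp2.contains x then tmp2 else tmp2 ++ [x]) []).length : Int)) := by
  induction b generalizing acc with
  | nil => simp
  | cons i rest ih =>
    rw [List.foldl_cons, ih]
    simp only [List.map_cons, List.append_assoc, List.singleton_append]

-- ===== VERDICT (by name: the statement is the Claim_ definition above) =====
theorem sns_spec : Claim_equal_sns := by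
  intro a b _
  unfold Spec_sns sns sns_alt
  rw [sns_foldl_map]
  simp only [List.nil_append]
  apply List.map_congr_left
  intro i _
  exact_mod_cast pointwise a i
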